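-- pv_equiv track=rewrite | github.com/HarrisonGreen/Advent-of-Code-2023 | Scripts/day9.py | previous_value
-- ===== SOURCE A (Python) =====
-- def get_differences(sequence):
--     return [sequence[i+1] - sequence[i] for i in range(len(sequence) - 1)]
--
-- def previous_value(sequence):
--     differences = get_differences(sequence)
--     rows = [differences]
--
--     while len(set(differences)) > 1:
--         differences = get_differences(differences)
--         rows.append(differences)
--
--     for i in range(len(rows)-2, -1, -1):
--         rows[i] = [rows[i][0] - rows[i+1][0]] + rows[i]
--
--     return sequence[0] - rows[0][0]
-- ===== SOURCE B (Python) =====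
-- def previous_value(sequence):
--     # Newton backward-difference closed form: previous value = sum_{i} (-1)^i * C(n, i+1) * sequence[i]
--     n = len(sequence)
--     total = 0
--     coef = n  # C(n, 1)
--     for i, x in enumerate(sequence):
--         term = coef * x
--         total += term if i % 2 == 0 else -term
--         coef = coef * (n - i - 1) // (i + 2)  # C(n, i+2)
--     return total
-- ===== Notes on version B (the rewrite author's own statement) =====
-- stated objective: faster
-- what changed: B replaces A's difference-table construction (repeated difference rows plus a backward substitution pass) by the Newton backward-difference closed form: a single pass computing the binomial-weighted alternating sum sum_i (-1)^i*C(n,i+1)*sequence[i] with the coefficient updated incrementally.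
import Mathlib
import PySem

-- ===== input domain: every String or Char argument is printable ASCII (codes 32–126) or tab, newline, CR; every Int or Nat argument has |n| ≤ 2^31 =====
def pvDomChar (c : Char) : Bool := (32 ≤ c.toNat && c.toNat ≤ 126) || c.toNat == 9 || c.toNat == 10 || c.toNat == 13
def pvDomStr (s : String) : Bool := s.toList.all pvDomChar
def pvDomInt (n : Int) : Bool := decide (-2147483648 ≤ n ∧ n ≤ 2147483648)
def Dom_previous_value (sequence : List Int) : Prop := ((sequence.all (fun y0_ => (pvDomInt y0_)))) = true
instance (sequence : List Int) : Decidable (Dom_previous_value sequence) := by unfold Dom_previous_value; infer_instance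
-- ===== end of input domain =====

-- B replaces A's difference-table construction and back-substitution by the Newton
-- backward-difference closed form (one pass, binomial coefficients kept incrementally);
-- objective: faster (O(n) list operations instead of O(n^2)).

-- ===== PORT A =====
def getDifferences (sequence : List Int) : List Int :=
  (PySem.List.pyRange 0 ((sequence.length : Int) - 1) 1).map
    (fun i => (PySem.List.pyGet? sequence (i + 1)).getD 0 - (PySem.List.pyGet? sequence i).getD 0)

lemma length_getDifferences (s : List Int) : (getDifferences s).length = s.length - 1 := by
  simp [getDifferences, PySem.List.length_pyRange_one]

-- the 'while len(set(differences)) > 1' loop, returning the accumulated rows list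
def buildRows (differences : List Int) : List (List Int) :=
  if 1 < (PySem.Set.ofList differences).length then
    differences :: buildRows (getDifferences differences)
  else [differences]
termination_by differences.length
decreasing_by
  have h1 := PySem.Set.length_ofList_le differences
  have h2 := length_getDifferences differences
  omega

-- body of the backward for loop: rows[i] = [rows[i][0] - rows[i+1][0]] + rows[i]
def backstep (rows : List (List Int)) (i : Int) : List (List Int) :=
  let ri := (PySem.List.pyGet? rows i).getD []
  let ri1 := (PySem.List.pyGet? rows (i + 1)).getD []
  rows.set i.toNat (((PySem.List.pyGet? ri 0).getD 0 - (PySem.List.pyGet? ri1 0).getD 0) :: ri)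

def previous_value (sequence : List Int) : Int :=
  let differences := getDifferences sequence
  let rows := buildRows differences
  let rows2 := (PySem.List.pyRange ((rows.length : Int) - 2) (-1) (-1)).foldl backstep rows
  (PySem.List.pyGet? sequence 0).getD 0 -
    (PySem.List.pyGet? ((PySem.List.pyGet? rows2 0).getD []) 0).getD 0

-- ===== PORT B =====
def previous_value_alt (sequence : List Int) : Int :=
  let n : Int := sequence.length
  ((PySem.List.enumerate sequence 0).foldl
    (fun (st : Int × Int) p =>
      let term := st.2 * p.2
      (if PySem.Int.mod p.1 2 == 0 then st.1 + term else st.1 - term,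
       PySem.Int.floordiv (st.2 * (n - p.1 - 1)) (p.1 + 2)))
    (0, n)).1

-- ===== PRECONDITION & SPEC =====
-- A raises IndexError on sequences of length < 2 (rows[0][0] on an empty difference row).
def Pre_previous_value (sequence : List Int) : Prop := 2 ≤ sequence.length
instance (sequence : List Int) : Decidable (Pre_previous_value sequence) := by
  unfold Pre_previous_value; infer_instance
def pvWitness_previous_value : List Int := [3, 1, 4]

def Spec_previous_value (sequence : List Int) (out : Int) : Prop := out = previous_value_alt sequence
instance (sequence : List Int) (out : Int) : Decidable (Spec_previous_value sequence out) := by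
  unfold Spec_previous_value; infer_instance

-- ===== CLAIM (what is proved, stated in full; the proofs are below) =====
def Claim_equal_previous_value : Prop := ∀ (sequence : List Int), Dom_previous_value sequence → Pre_previous_value sequence → Spec_previous_value sequence (previous_value sequence)

-- ===== LEMMAS AND PROOFS =====

-- full-depth backward extrapolation: prev(s) = s[0] - prev(differences(s))
def pvF (s : List Int) : Int :=
  if 2 ≤ s.length then s.headI - pvF (getDifferences s) else s.headI
termination_by s.length
decreasing_by
  have h2 := length_getDifferences s
  omega

def cfSum (s : List Int) : Int :=
  ∑ j ∈ Finset.range s.length, (-1 : ℤ) ^ j * (s.length.choose (j + 1) : ℤ) * s.getD j 0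

def pvHH (l : List (List Int)) : Int :=
  (PySem.List.pyGet? ((PySem.List.pyGet? l 0).getD []) 0).getD 0

def pvBp (rows : List (List Int)) : List (List Int) :=
  (PySem.List.pyRange ((rows.length : Int) - 2) (-1) (-1)).foldl backstep rows

lemma getElem_getDifferences (s : List Int) (k : Nat) (h : k < (getDifferences s).length) :
    (getDifferences s)[k] = s.getD (k + 1) 0 - s.getD k 0 := by
  have hk : k < s.length - 1 := by rwa [length_getDifferences] at h
  unfold getDifferences
  rw [List.getElem_map]
  rw [PySem.List.getElem_pyRange_one]
  have h1 : (0 : Int) + (k : Int) + 1 = ((k + 1 : Nat) : Int) := by omega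
  have h2 : (0 : Int) + (k : Int) = ((k : Nat) : Int) := by omega
  rw [h1, h2, PySem.List.pyGet?_natCast, PySem.List.pyGet?_natCast]
  simp [List.getD_eq_getElem?_getD]

lemma headI_mem' (s : List Int) (h : s ≠ []) : s.headI ∈ s := by
  cases s with
  | nil => exact absurd rfl h
  | cons a t => simp [List.headI]

lemma mem_getDifferences (s : List Int) (x : Int) (hx : x ∈ getDifferences s) :
    ∃ k : Nat, k + 1 < s.length ∧ x = s.getD (k + 1) 0 - s.getD k 0 := by
  rcases List.mem_iff_getElem.mp hx with ⟨k, hk, rfl⟩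
  refine ⟨k, ?_, (getElem_getDifferences s k hk).symm ▸ rfl⟩
  have := length_getDifferences s
  omega

lemma pvF_const : ∀ (n : Nat) (s : List Int) (c : Int), s.length = n → s ≠ [] →
    (∀ x ∈ s, x = c) → pvF s = c := by
  intro n
  induction n using Nat.strong_induction_on with
  | _ n ih =>
    intro s c hn hne hc
    rw [pvF]
    by_cases h2 : 2 ≤ s.length
    · have hd : s.headI = c := hc _ (headI_mem' s hne)
      have hdiffne : getDifferences s ≠ [] := by
        have := length_getDifferences s
        intro h; rw [h] at this; simp at this; omega
      have hz : pvF (getDifferences s) = 0 := by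
        refine ih (getDifferences s).length ?_ _ 0 rfl hdiffne ?_
        · have := length_getDifferences s; omega
        · intro x hx
          rcases mem_getDifferences s x hx with ⟨k, hk, rfl⟩
          have e1 : s.getD (k+1) 0 = c := by
            rw [List.getD_eq_getElem s 0 hk]; exact hc _ (List.getElem_mem hk)
          have e2 : s.getD k 0 = c := by
            have hk' : k < s.length := by omega
            rw [List.getD_eq_getElem s 0 hk']; exact hc _ (List.getElem_mem hk')
          rw [e1, e2]; ring
      rw [if_pos h2, hd, hz]; ring
    · rw [if_neg h2]; exact hc _ (headI_mem' s hne)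

lemma newton_step (m : Nat) (a : ℕ → ℤ) :
    ∑ j ∈ Finset.range (m + 1), (-1 : ℤ) ^ j * ((m + 1).choose (j + 1) : ℤ) * a j
      = a 0 - ∑ j ∈ Finset.range m, (-1 : ℤ) ^ j * ((m.choose (j + 1) : ℤ)) * (a (j + 1) - a j) := by
  have pascal : ∀ j : ℕ, ((m + 1).choose (j + 1) : ℤ) = (m.choose j : ℤ) + (m.choose (j + 1) : ℤ) := by
    intro j; exact_mod_cast Nat.choose_succ_succ m j
  have split : ∑ j ∈ Finset.range (m + 1), (-1 : ℤ) ^ j * ((m + 1).choose (j + 1) : ℤ) * a j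
      = (∑ j ∈ Finset.range (m + 1), (-1 : ℤ) ^ j * (m.choose j : ℤ) * a j)
      + (∑ j ∈ Finset.range (m + 1), (-1 : ℤ) ^ j * (m.choose (j + 1) : ℤ) * a j) := by
    rw [← Finset.sum_add_distrib]
    refine Finset.sum_congr rfl fun j _ => by rw [pascal]; ring
  have s1 : ∑ j ∈ Finset.range (m + 1), (-1 : ℤ) ^ j * (m.choose j : ℤ) * a j
      = (∑ j ∈ Finset.range m, (-1 : ℤ) ^ (j + 1) * (m.choose (j + 1) : ℤ) * a (j + 1)) + a 0 := by
    rw [Finset.sum_range_succ' (fun j => (-1 : ℤ) ^ j * (m.choose j : ℤ) * a j) m]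
    simp
  have s2 : ∑ j ∈ Finset.range (m + 1), (-1 : ℤ) ^ j * (m.choose (j + 1) : ℤ) * a j
      = ∑ j ∈ Finset.range m, (-1 : ℤ) ^ j * (m.choose (j + 1) : ℤ) * a j := by
    rw [Finset.sum_range_succ]
    simp [Nat.choose_succ_self]
  rw [split, s1, s2]
  have comb : (∑ j ∈ Finset.range m, (-1 : ℤ) ^ (j + 1) * (m.choose (j + 1) : ℤ) * a (j + 1))
      + ∑ j ∈ Finset.range m, (-1 : ℤ) ^ j * (m.choose (j + 1) : ℤ) * a j
      = -∑ j ∈ Finset.range m, (-1 : ℤ) ^ j * (m.choose (j + 1) : ℤ) * (a (j + 1) - a j) := by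
    rw [← Finset.sum_add_distrib, ← Finset.sum_neg_distrib]
    refine Finset.sum_congr rfl fun j _ => by ring
  linarith [comb]

lemma pvF_closed : ∀ (n : Nat) (s : List Int), s.length = n → 1 ≤ n → pvF s = cfSum s := by
  intro n
  induction n using Nat.strong_induction_on with
  | _ n ih =>
    intro s hn h1
    rw [pvF]
    by_cases h2 : 2 ≤ s.length
    · obtain ⟨m, hm⟩ : ∃ m, n = m + 1 := ⟨n - 1, by omega⟩
      have hdl : (getDifferences s).length = m := by rw [length_getDifferences]; omega
      have hIH : pvF (getDifferences s) = cfSum (getDifferences s) :=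
        ih m (by omega) _ hdl (by omega)
      have hne : s ≠ [] := by intro h; rw [h] at hn; simp at hn; omega
      have hdiff : cfSum (getDifferences s)
          = ∑ j ∈ Finset.range m, (-1 : ℤ) ^ j * (m.choose (j + 1) : ℤ) * (s.getD (j + 1) 0 - s.getD j 0) := by
        unfold cfSum
        rw [hdl]
        refine Finset.sum_congr rfl fun j hj => ?_
        have hj' : j < (getDifferences s).length := by rw [hdl]; exact Finset.mem_range.mp hj
        rw [List.getD_eq_getElem _ 0 hj', getElem_getDifferences s j hj']
      have hhead : s.headI = s.getD 0 0 := by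
        cases s with
        | nil => simp at hn; omega
        | cons a t => simp [List.headI]
      rw [if_pos h2, hIH, hdiff, hhead]
      unfold cfSum
      rw [hn, hm]
      rw [newton_step m (fun j => s.getD j 0)]
    · -- length = 1
      have hl : s.length = 1 := by omega
      unfold cfSum
      rw [if_neg h2, hl]
      have hhead : s.headI = s.getD 0 0 := by
        cases s with
        | nil => simp at hl
        | cons a t => simp [List.headI]
      simp [hhead]

lemma backstep_cons_shift (r : List Int) (rows : List (List Int)) (i : Int) (hi : 0 ≤ i) :
    backstep (r :: rows) (i + 1) = r :: backstep rows i := by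
  obtain ⟨k, rfl⟩ : ∃ k : Nat, i = (k : Int) := ⟨i.toNat, by omega⟩
  unfold backstep
  have e2 : (k : Int) + 1 + 1 = ((k + 1 : Nat) : Int) + 1 := by push_cast; ring
  rw [PySem.List.pyGet?_cons_succ, e2, PySem.List.pyGet?_cons_succ]
  have e3 : ((k : Int) + 1).toNat = (k : Int).toNat + 1 := by omega
  rw [e3]
  simp [List.set]

lemma foldl_backstep_shift : ∀ (L : List Int), (∀ i ∈ L, 0 ≤ i) →
    ∀ (r : List Int) (rows : List (List Int)),
    (L.map (· + 1)).foldl backstep (r :: rows) = r :: L.foldl backstep rows := by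
  intro L
  induction L with
  | nil => intro _ r rows; simp
  | cons i t ih =>
    intro h r rows
    simp only [List.map_cons, List.foldl_cons]
    rw [backstep_cons_shift r rows i (h i (by simp))]
    exact ih (fun j hj => h j (by simp [hj])) r (backstep rows i)

lemma pvBp_singleton (r : List Int) : pvBp [r] = [r] := by
  unfold pvBp
  rw [PySem.List.pyRange_neg_one_eq_nil (by norm_num)]
  rfl

lemma backstep_zero (r : List Int) (rows : List (List Int)) :
    backstep (r :: rows) 0 = (((PySem.List.pyGet? r 0).getD 0 - pvHH rows) :: r) :: rows := by
  unfold backstep pvHH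
  have h1 : PySem.List.pyGet? (r :: rows) (0 + 1) = rows[0]? := by
    have := PySem.List.pyGet?_cons_succ r rows 0
    simpa [PySem.List.pyGet?_zero] using this
  rw [PySem.List.pyGet?_zero_cons, h1]
  simp [PySem.List.pyGet?_zero]

lemma pvBp_cons (r : List Int) (rest : List (List Int)) (h : rest ≠ []) :
    pvBp (r :: rest) =
      (((PySem.List.pyGet? r 0).getD 0 - pvHH (pvBp rest)) :: r) :: pvBp rest := by
  obtain ⟨m, hm⟩ : ∃ m : Nat, rest.length = m + 1 := by
    cases rest with
    | nil => exact absurd rfl h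
    | cons a t => exact ⟨t.length, by simp⟩
  have hpv : pvBp rest = (PySem.List.pyRange ((m : Int) - 1) (-1) (-1)).foldl backstep rest := by
    unfold pvBp
    congr 2
    rw [hm]; push_cast; ring
  have hsplit : PySem.List.pyRange (((r :: rest).length : Int) - 2) (-1) (-1)
      = ((PySem.List.pyRange ((m : Int) - 1) (-1) (-1)).map (· + 1)) ++ [0] := by
    have hlen : ((r :: rest).length : Int) - 2 = (m : Int) := by
      rw [List.length_cons, hm]; push_cast; ring
    rw [hlen]
    rw [PySem.List.pyRange_neg_one, PySem.List.pyRange_neg_one]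
    have h1 : ((m : Int) - -1).toNat = m + 1 := by omega
    have h2 : (((m : Int) - 1) - -1).toNat = m := by omega
    rw [h1, h2, List.range_succ, List.map_append, List.map_map]
    congr 1
    · refine List.map_congr_left fun k hk => ?_
      simp only [Function.comp_apply]
      ring
    · simp
  have hnn : ∀ i ∈ PySem.List.pyRange ((m : Int) - 1) (-1) (-1), 0 ≤ i := by
    intro i hi
    rw [PySem.List.mem_pyRange_neg_one] at hi
    omega
  conv_lhs => rw [pvBp]
  rw [hsplit, List.foldl_append, foldl_backstep_shift _ hnn]
  simp only [List.foldl_cons, List.foldl_nil]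
  rw [← hpv]
  exact backstep_zero r (pvBp rest)

lemma buildRows_ne_nil (d : List Int) : buildRows d ≠ [] := by
  rw [buildRows]; split <;> simp

lemma const_of_set_small (d : List Int) (hne : d ≠ [])
    (h : ¬ 1 < (PySem.Set.ofList d).length) : ∀ x ∈ d, x = d.headI := by
  intro x hx
  have hc : d.headI ∈ PySem.Set.ofList d := (PySem.Set.mem_ofList d d.headI).mpr (headI_mem' d hne)
  have hx' : x ∈ PySem.Set.ofList d := (PySem.Set.mem_ofList d x).mpr hx
  have hlen : (PySem.Set.ofList d).length = 1 := by
    have : (PySem.Set.ofList d).length ≠ 0 := by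
      intro h0
      rw [List.length_eq_zero_iff] at h0
      rw [h0] at hc
      exact absurd hc (List.not_mem_nil)
    omega
  rcases List.length_eq_one_iff.mp hlen with ⟨y, hy⟩
  rw [hy] at hc hx'
  simp at hc hx'
  rw [hc, hx']

lemma headI_eq_pyGet (d : List Int) (hne : d ≠ []) :
    (PySem.List.pyGet? d 0).getD 0 = d.headI := by
  cases d with
  | nil => exact absurd rfl hne
  | cons a t => rw [PySem.List.pyGet?_zero_cons]; rfl

lemma hh_pvBp_buildRows : ∀ (n : Nat) (d : List Int), d.length = n → d ≠ [] →
    pvHH (pvBp (buildRows d)) = pvF d := by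
  intro n
  induction n using Nat.strong_induction_on with
  | _ n ih =>
    intro d hn hne
    rw [buildRows]
    by_cases hcond : 1 < (PySem.Set.ofList d).length
    · rw [if_pos hcond]
      have hlen2 : 2 ≤ d.length := by
        have := PySem.Set.length_ofList_le d
        omega
      have hdne : getDifferences d ≠ [] := by
        have := length_getDifferences d
        intro h0; rw [h0] at this; simp at this; omega
      rw [pvBp_cons _ _ (buildRows_ne_nil _)]
      have hih : pvHH (pvBp (buildRows (getDifferences d))) = pvF (getDifferences d) := by
        refine ih (getDifferences d).length ?_ _ rfl hdne
        have := length_getDifferences d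
        omega
      unfold pvHH
      rw [PySem.List.pyGet?_zero_cons]
      simp only [Option.getD_some, PySem.List.pyGet?_zero_cons]
      conv_rhs => rw [pvF]
      rw [if_pos hlen2, headI_eq_pyGet d hne]
      unfold pvHH at hih
      rw [hih]
    · rw [if_neg hcond, pvBp_singleton]
      have := pvF_const d.length d d.headI rfl hne (const_of_set_small d hne hcond)
      rw [this]
      unfold pvHH
      rw [PySem.List.pyGet?_zero_cons]
      simp only [Option.getD_some]
      exact headI_eq_pyGet d hne

lemma coef_step (n k : Nat) (h : k + 1 ≤ n) :
    PySem.Int.floordiv ((n.choose (k + 1) : Int) * ((n : Int) - (k : Int) - 1)) ((k : Int) + 2)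
      = (n.choose (k + 2) : Int) := by
  have e1 : (n : Int) - (k : Int) - 1 = ((n - (k + 1) : Nat) : Int) := by omega
  have e2 : ((k : Int) + 2) = ((k + 2 : Nat) : Int) := by omega
  rw [e1, e2, ← Nat.cast_mul]
  rw [PySem.Int.floordiv_natCast]
  congr 1
  have hc : n.choose (k + 2) * (k + 2) = n.choose (k + 1) * (n - (k + 1)) :=
    Nat.choose_succ_right_eq n (k + 1)
  rw [← hc, Nat.mul_div_cancel _ (by omega)]

lemma foldB (n : Nat) : ∀ (t : List Int) (k : Nat) (T : Int), k + t.length = n →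
    ((PySem.List.enumerate t (k : Int)).foldl
      (fun (st : Int × Int) p =>
        let term := st.2 * p.2
        (if PySem.Int.mod p.1 2 == 0 then st.1 + term else st.1 - term,
         PySem.Int.floordiv (st.2 * ((n : Int) - p.1 - 1)) (p.1 + 2)))
      (T, (n.choose (k + 1) : Int))).1
    = T + ∑ j ∈ Finset.range t.length,
        (-1 : ℤ) ^ (k + j) * (n.choose (k + j + 1) : ℤ) * t.getD j 0 := by
  intro t
  induction t with
  | nil => intro k T hk; simp [PySem.List.enumerate]
  | cons x t ih =>
    intro k T hk
    rw [PySem.List.enumerate_cons]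
    simp only [List.foldl_cons]
    have hmod : (PySem.Int.mod (k : Int) 2 == 0) = ((-1 : ℤ) ^ k == 1) := by
      rw [PySem.Int.mod_eq_emod_of_pos (by norm_num : (0:Int) < 2)]
      rcases Nat.even_or_odd k with he | ho
      · obtain ⟨m, rfl⟩ := he
        rw [Even.neg_one_pow (by exact ⟨m, rfl⟩)]
        simp
        omega
      · obtain ⟨m, rfl⟩ := ho
        rw [Odd.neg_one_pow (by exact ⟨m, rfl⟩)]
        simp
    have hcoef : PySem.Int.floordiv ((n.choose (k + 1) : Int) * ((n : Int) - (k : Int) - 1)) ((k : Int) + 2)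
        = (n.choose (k + 1 + 1) : Int) := coef_step n k (by simp at hk; omega)
    have hk1 : ((k : Int) + 1) = ((k + 1 : Nat) : Int) := by omega
    have hterm : (if PySem.Int.mod (k : Int) 2 == 0
          then T + (n.choose (k + 1) : Int) * x else T - (n.choose (k + 1) : Int) * x)
        = T + (-1 : ℤ) ^ k * (n.choose (k + 1) : ℤ) * x := by
      rw [hmod]
      rcases Nat.even_or_odd k with he | ho
      · rw [Even.neg_one_pow he]; simp
      · rw [Odd.neg_one_pow ho]; norm_num; ring
    simp only [hcoef, hterm]
    rw [hk1, ih (k + 1) _ (by simp at hk ⊢; omega)]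
    simp only [List.length_cons]
    rw [Finset.sum_range_succ' (fun j => (-1 : ℤ) ^ (k + j) * (n.choose (k + j + 1) : ℤ) * (x :: t).getD j 0) t.length]
    have hre : ∑ j ∈ Finset.range t.length, (-1 : ℤ) ^ (k + 1 + j) * (n.choose (k + 1 + j + 1) : ℤ) * t.getD j 0
        = ∑ j ∈ Finset.range t.length, (-1 : ℤ) ^ (k + (j + 1)) * (n.choose (k + (j + 1) + 1) : ℤ) * (x :: t).getD (j + 1) 0 := by
      refine Finset.sum_congr rfl fun j _ => ?_
      have : k + 1 + j = k + (j + 1) := by ring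
      rw [this]
      rfl
    rw [hre]
    simp [List.getD]
    ring

lemma alt_eq_cfSum (s : List Int) : previous_value_alt s = cfSum s := by
  unfold previous_value_alt
  have h := foldB s.length s 0 0 (by simp)
  rw [Nat.choose_one_right] at h
  simpa [cfSum] using h

-- ===== VERDICT (by name: the statement is the Claim_ definition above) =====
theorem previous_value_spec : Claim_equal_previous_value := by
  intro s _ hpre
  unfold Spec_previous_value
  unfold Pre_previous_value at hpre
  have hd := length_getDifferences s
  have hdne : getDifferences s ≠ [] := by
    intro h0; rw [h0] at hd; simp at hd; omega
  have hne : s ≠ [] := by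
    intro h0; rw [h0] at hpre; simp at hpre
  have hA : previous_value s = pvF s := by
    show (PySem.List.pyGet? s 0).getD 0 - pvHH (pvBp (buildRows (getDifferences s))) = pvF s
    rw [hh_pvBp_buildRows (getDifferences s).length _ rfl hdne, headI_eq_pyGet s hne]
    conv_rhs => rw [pvF]
    rw [if_pos hpre]
  rw [hA, alt_eq_cfSum, pvF_closed s.length s rfl (by omega)]
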